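-- pv_equiv track=rewrite | github.com/liupei-wq/Data-Processing-GUI | modules/xrd.py | _default_compare_columns
-- ===== SOURCE A (Python) =====
-- def _default_compare_columns(columns: list[str]) -> list[str]:
--     ordered: list[str] = []
--     for matcher in [
--         lambda c: c.endswith("_raw") or c == "Intensity_raw",
--         lambda c: c.endswith("_gaussian_subtracted"),
--         lambda c: c.endswith("_smoothed") or c == "Intensity_smoothed",
--         lambda c: c.endswith("_normalized") or c == "Intensity_normalized",
--         lambda c: c.endswith("_log10") or c.endswith("_ln"),
--     ]:
--         match = next((col for col in columns if matcher(col)), None)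
--         if match and match not in ordered:
--             ordered.append(match)
--     return ordered[: min(3, len(ordered))] if ordered else columns[: min(3, len(columns))]
-- ===== SOURCE B (Python) =====
-- def _default_compare_columns(columns: list[str]) -> list[str]:
--     matchers = [
--         lambda c: c.endswith("_raw"),
--         lambda c: c.endswith("_gaussian_subtracted"),
--         lambda c: c.endswith("_smoothed"),
--         lambda c: c.endswith("_normalized"),
--         lambda c: c.endswith("_log10") or c.endswith("_ln"),
--     ]
--     slots = [None] * 5
--     for col in columns:
--         for p, m in enumerate(matchers):
--             if m(col):
--                 if slots[p] is None:
--                     slots[p] = col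
--                 break
--     ordered = [s for s in slots if s is not None]
--     return ordered[:3] if ordered else columns[:3]
-- ===== Notes on version B (the rewrite author's own statement) =====
-- stated objective: alternative
-- what changed: Single pass over the columns filling a 5-slot first-match-per-bucket table, instead of five separate scans of the column list with a dedup check; the redundant 'Intensity_*' equality tests (subsumed by their suffix tests) are dropped.
import Mathlib
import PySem

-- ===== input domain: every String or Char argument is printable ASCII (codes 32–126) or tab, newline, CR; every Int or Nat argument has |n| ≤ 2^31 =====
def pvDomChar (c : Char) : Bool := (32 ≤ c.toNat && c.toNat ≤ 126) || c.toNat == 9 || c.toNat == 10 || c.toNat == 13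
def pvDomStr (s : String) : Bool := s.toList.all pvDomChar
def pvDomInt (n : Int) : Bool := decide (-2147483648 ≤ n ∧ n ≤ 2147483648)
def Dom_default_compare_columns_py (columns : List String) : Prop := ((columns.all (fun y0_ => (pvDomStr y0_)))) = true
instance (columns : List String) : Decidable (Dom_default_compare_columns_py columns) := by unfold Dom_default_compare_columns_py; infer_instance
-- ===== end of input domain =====

-- B replaces A's five scans of the column list (one per suffix matcher, with a dedup check)
-- by a single pass filling a 5-slot first-match-per-bucket table; objective: alternative.
set_option maxHeartbeats 1000000


-- ===== PORT A =====
def aMatchers : List (String → Bool) :=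
  [fun c => PySem.Str.endswith c "_raw" || c == "Intensity_raw",
   fun c => PySem.Str.endswith c "_gaussian_subtracted",
   fun c => PySem.Str.endswith c "_smoothed" || c == "Intensity_smoothed",
   fun c => PySem.Str.endswith c "_normalized" || c == "Intensity_normalized",
   fun c => PySem.Str.endswith c "_log10" || PySem.Str.endswith c "_ln"]

def default_compare_columns_py (columns : List String) : List String :=
  let ordered := aMatchers.foldl (fun ordered matcher =>
    match columns.find? matcher with
    | some m => if m ≠ "" ∧ m ∉ ordered then ordered ++ [m] else ordered  -- `if match and match not in ordered`
    | none => ordered) []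
  if ordered ≠ [] then ordered.take (min 3 ordered.length)
  else columns.take (min 3 columns.length)

-- ===== PORT B =====
def bMatchers : List (String → Bool) :=
  [fun c => PySem.Str.endswith c "_raw",
   fun c => PySem.Str.endswith c "_gaussian_subtracted",
   fun c => PySem.Str.endswith c "_smoothed",
   fun c => PySem.Str.endswith c "_normalized",
   fun c => PySem.Str.endswith c "_log10" || PySem.Str.endswith c "_ln"]

-- the inner `for p, m in enumerate(matchers): if m(col): … break` of Source B
def bStep (slots : List (Option String)) (col : String) : List (Option String) :=
  match (bMatchers.zipIdx).find? (fun pm => pm.1 col) with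
  | some (_, p) => if slots[p]? = some none then slots.set p (some col) else slots
  | none => slots

def default_compare_columns_py_alt (columns : List String) : List String :=
  let slots := columns.foldl bStep [none, none, none, none, none]
  let ordered := slots.filterMap id
  if ordered ≠ [] then ordered.take 3 else columns.take 3

-- ===== PRECONDITION & SPEC =====
def Spec_default_compare_columns_py (columns : List String) (out : List String) : Prop := out = default_compare_columns_py_alt columns
instance (columns : List String) (out : List String) : Decidable (Spec_default_compare_columns_py columns out) := by unfold Spec_default_compare_columns_py; infer_instance

-- ===== CLAIM (what is proved, stated in full; the proofs are below) =====
def Claim_equal_default_compare_columns_py : Prop := ∀ (columns : List String), Dom_default_compare_columns_py columns → Spec_default_compare_columns_py columns (default_compare_columns_py columns)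

-- ===== LEMMAS AND PROOFS =====

-- the five suffix buckets, as a function of the priority index
def mp (p : Nat) (c : String) : Bool :=
  match p with
  | 0 => PySem.Str.endswith c "_raw"
  | 1 => PySem.Str.endswith c "_gaussian_subtracted"
  | 2 => PySem.Str.endswith c "_smoothed"
  | 3 => PySem.Str.endswith c "_normalized"
  | 4 => PySem.Str.endswith c "_log10" || PySem.Str.endswith c "_ln"
  | _ => false

-- two of the six suffix literals on the same string force one to be a suffix of the other
theorem suffix_excl {s t : List Char} (c : String)
    (h1 : PySem.Chars.endswith c.toList s = true)
    (h2 : PySem.Chars.endswith c.toList t = true)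
    (hst : ¬ s <:+ t) (hts : ¬ t <:+ s) : False := by
  rcases List.suffix_or_suffix_of_suffix ((PySem.Chars.endswith_iff _ _).1 h1)
      ((PySem.Chars.endswith_iff _ _).1 h2) with h | h
  · exact hst h
  · exact hts h

-- the suffix literals that witness each bucket (duplicated to keep the shape uniform)
def sfxs (p : Nat) : List (List Char) :=
  match p with
  | 0 => ["_raw".toList, "_raw".toList]
  | 1 => ["_gaussian_subtracted".toList, "_gaussian_subtracted".toList]
  | 2 => ["_smoothed".toList, "_smoothed".toList]
  | 3 => ["_normalized".toList, "_normalized".toList]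
  | 4 => ["_log10".toList, "_ln".toList]
  | _ => []

theorem mp_sfx {p : Nat} {c : String} (hp : p < 5) (h : mp p c = true) :
    ∃ s ∈ sfxs p, s <:+ c.toList := by
  interval_cases p <;>
    simp only [mp, Bool.or_eq_true, PySem.Str.endswith_eq, PySem.Chars.endswith_iff] at h <;>
    simp only [sfxs, List.mem_cons, List.not_mem_nil, or_false, exists_eq_or_imp,
      exists_eq_left] <;> tauto

-- the five buckets are mutually exclusive
theorem mp_excl {p q : Nat} {c : String} (hp : p < 5) (hq : q < 5)
    (h1 : mp p c = true) (h2 : mp q c = true) : p = q := by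
  by_contra hne
  obtain ⟨s, hs, hsc⟩ := mp_sfx hp h1
  obtain ⟨t, ht, htc⟩ := mp_sfx hq h2
  have hcross : ¬ s <:+ t ∧ ¬ t <:+ s := by
    interval_cases p <;> interval_cases q <;> simp_all [sfxs] <;>
      rcases hs with rfl | rfl <;> rcases ht with rfl | rfl <;> exact ⟨by decide, by decide⟩
  exact suffix_excl c (by simpa [PySem.Chars.endswith_iff] using hsc)
    (by simpa [PySem.Chars.endswith_iff] using htc) hcross.1 hcross.2

theorem mp_empty {p : Nat} (h : mp p "" = true) : False := by
  match p with
  | 0 | 1 | 2 | 3 | 4 => revert h; decide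
  | n + 5 => exact Bool.false_ne_true h

-- A's first, third and fourth matchers agree with the plain-suffix buckets
-- (their equality tests are subsumed by the suffix tests); the other two agree literally
theorem aM0 : (fun c => PySem.Str.endswith c "_raw" || c == "Intensity_raw") = mp 0 := by
  funext c
  by_cases h : c = "Intensity_raw"
  · subst h; decide
  · simp [mp, h]

theorem aM2 : (fun c => PySem.Str.endswith c "_smoothed" || c == "Intensity_smoothed") = mp 2 := by
  funext c
  by_cases h : c = "Intensity_smoothed"
  · subst h; decide
  · simp [mp, h]

theorem aM3 : (fun c => PySem.Str.endswith c "_normalized" || c == "Intensity_normalized") = mp 3 := by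
  funext c
  by_cases h : c = "Intensity_normalized"
  · subst h; decide
  · simp [mp, h]

theorem aM1 : (fun c => PySem.Str.endswith c "_gaussian_subtracted") = mp 1 := rfl

theorem aM4 : (fun c => PySem.Str.endswith c "_log10" || PySem.Str.endswith c "_ln") = mp 4 := rfl

-- first column of `cols` in bucket p
def F (p : Nat) (cols : List String) : Option String := cols.find? (mp p)

theorem F_uniq {p q : Nat} {c : String} {cols : List String} (hp : p < 5) (hq : q < 5)
    (h1 : F p cols = some c) (h2 : F q cols = some c) : p = q :=
  mp_excl hp hq (List.find?_some h1) (List.find?_some h2)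

theorem F_ne_empty {p : Nat} {cols : List String} (h : F p cols = some "") : False :=
  mp_empty (List.find?_some h)

-- ===== A-side characterisation =====

-- one step of A's loop, as a function of the (optional) match it found
def stepO (o : List String) (x : Option String) : List String :=
  match x with
  | some m => if m ≠ "" ∧ m ∉ o then o ++ [m] else o
  | none => o

theorem foldl_stepO (L : List (Option String)) (acc : List String)
    (h : ∀ c, some c ∈ L → c ≠ "" ∧ c ∉ acc)
    (hnd : (L.filterMap id).Nodup) :
    L.foldl stepO acc = acc ++ L.filterMap id := by
  induction L generalizing acc with
  | nil => simp
  | cons a L ih =>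
    cases a with
    | none => simpa using ih acc (fun c hc => h c (by simp [hc])) (by simpa using hnd)
    | some m =>
      have hm := h m (by simp)
      have hnd' : m ∉ L.filterMap id ∧ (L.filterMap id).Nodup := by
        simpa using hnd
      rw [List.foldl_cons]
      show L.foldl stepO (if m ≠ "" ∧ m ∉ acc then acc ++ [m] else acc) = _
      rw [if_pos ⟨hm.1, hm.2⟩, ih (acc ++ [m]) ?_ hnd'.2]
      · simp
      · intro c hc
        refine ⟨(h c (by simp [hc])).1, ?_⟩
        simp only [List.mem_append, List.mem_singleton, not_or]
        refine ⟨(h c (by simp [hc])).2, ?_⟩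
        rintro rfl
        exact hnd'.1 (List.mem_filterMap.2 ⟨some c, hc, rfl⟩)

theorem nodup_fm (L : List (Option String))
    (h : L.Pairwise (fun a b => ∀ x, a = some x → b ≠ some x)) :
    (L.filterMap id).Nodup := by
  induction L with
  | nil => simp
  | cons a L ih =>
    rcases List.pairwise_cons.1 h with ⟨ha, hL⟩
    cases a with
    | none => simpa using ih hL
    | some m =>
      rw [show List.filterMap id (some m :: L) = m :: List.filterMap id L from rfl,
        List.nodup_cons]
      refine ⟨fun hmem => ?_, ih hL⟩
      rcases List.mem_filterMap.1 hmem with ⟨b, hb, hbm⟩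
      exact ha b hb m rfl (by simpa [id] using hbm)

theorem A_ordered (cols : List String) :
    aMatchers.foldl (fun ordered matcher =>
      match cols.find? matcher with
      | some m => if m ≠ "" ∧ m ∉ ordered then ordered ++ [m] else ordered
      | none => ordered) [] =
    ([F 0 cols, F 1 cols, F 2 cols, F 3 cols, F 4 cols].filterMap id) := by
  simp only [aMatchers, aM0, aM1, aM2, aM3, aM4]
  show ([mp 0, mp 1, mp 2, mp 3, mp 4].foldl (fun o m => stepO o (cols.find? m)) []) = _
  rw [← List.foldl_map (f := cols.find?) (g := stepO)]
  have hmap : [mp 0, mp 1, mp 2, mp 3, mp 4].map cols.find? =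
      [F 0 cols, F 1 cols, F 2 cols, F 3 cols, F 4 cols] := by simp [F]
  rw [hmap]
  have hP : List.Pairwise (fun a b => ∀ x, a = some x → b ≠ some x)
      [F 0 cols, F 1 cols, F 2 cols, F 3 cols, F 4 cols] := by
    rw [List.pairwise_iff_getElem]
    intro i j hi hj hij x hxi hxj
    simp only [List.length_cons, List.length_nil] at hi hj
    interval_cases i <;> interval_cases j <;> first
      | omega
      | (simp only [List.getElem_cons_zero, List.getElem_cons_succ] at hxi hxj
         exact absurd (F_uniq (by omega) (by omega) hxi hxj) (by omega))
  refine foldl_stepO _ _ (fun c hc => ⟨?_, by simp⟩) (nodup_fm _ hP)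
  simp only [List.mem_cons, List.not_mem_nil, or_false] at hc
  rintro rfl
  rcases hc with h | h | h | h | h <;> exact F_ne_empty h.symm

theorem take_min3 (l : List String) : l.take (min 3 l.length) = l.take 3 := by
  rw [← List.take_take, List.take_length]

-- ===== B-side characterisation =====

theorem bStep_eq (pre : List String) (col : String) :
    bStep [F 0 pre, F 1 pre, F 2 pre, F 3 pre, F 4 pre] col =
    [F 0 (pre ++ [col]), F 1 (pre ++ [col]), F 2 (pre ++ [col]), F 3 (pre ++ [col]),
     F 4 (pre ++ [col])] := by
  have hFa : ∀ p, F p (pre ++ [col]) = (F p pre).or (if mp p col then some col else none) := by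
    intro p; cases hmp : mp p col <;> simp [F, List.find?_append, List.find?, hmp]
  have hexcl : ∀ p q, p < 5 → q < 5 → q ≠ p → mp p col = true → mp q col = false := by
    intro p q hp hq hne hpos
    by_contra h'
    exact hne (mp_excl hq hp (by simpa using h') hpos)
  by_cases h0 : mp 0 col = true
  · have h1 := hexcl 0 1 (by omega) (by omega) (by omega) h0
    have h2 := hexcl 0 2 (by omega) (by omega) (by omega) h0
    have h3 := hexcl 0 3 (by omega) (by omega) (by omega) h0
    have h4 := hexcl 0 4 (by omega) (by omega) (by omega) h0
    have hp := h0
    simp [mp] at h0 h1 h2 h3 h4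
    rcases hF : F 0 pre with _ | c <;>
      simp [bStep, bMatchers, List.zipIdx, List.find?, h0, h1, h2, h3, h4, hF,
        hFa 0, hFa 1, hFa 2, hFa 3, hFa 4, hp, mp]
  · by_cases h1 : mp 1 col = true
    · have h2 := hexcl 1 2 (by omega) (by omega) (by omega) h1
      have h3 := hexcl 1 3 (by omega) (by omega) (by omega) h1
      have h4 := hexcl 1 4 (by omega) (by omega) (by omega) h1
      have hp := h1
      simp only [Bool.not_eq_true] at h0
      simp [mp] at h0 h1 h2 h3 h4
      rcases hF : F 1 pre with _ | c <;>
        simp [bStep, bMatchers, List.zipIdx, List.find?, h0, h1, h2, h3, h4, hF,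
          hFa 0, hFa 1, hFa 2, hFa 3, hFa 4, hp, mp]
    · by_cases h2 : mp 2 col = true
      · have h3 := hexcl 2 3 (by omega) (by omega) (by omega) h2
        have h4 := hexcl 2 4 (by omega) (by omega) (by omega) h2
        have hp := h2
        simp only [Bool.not_eq_true] at h0 h1
        simp [mp] at h0 h1 h2 h3 h4
        rcases hF : F 2 pre with _ | c <;>
          simp [bStep, bMatchers, List.zipIdx, List.find?, h0, h1, h2, h3, h4, hF,
            hFa 0, hFa 1, hFa 2, hFa 3, hFa 4, hp, mp]
      · by_cases h3 : mp 3 col = true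
        · have h4 := hexcl 3 4 (by omega) (by omega) (by omega) h3
          have hp := h3
          simp only [Bool.not_eq_true] at h0 h1 h2
          simp [mp] at h0 h1 h2 h3 h4
          rcases hF : F 3 pre with _ | c <;>
            simp [bStep, bMatchers, List.zipIdx, List.find?, h0, h1, h2, h3, h4, hF,
              hFa 0, hFa 1, hFa 2, hFa 3, hFa 4, hp, mp]
        · by_cases h4 : mp 4 col = true
          · have hp := h4
            simp only [Bool.not_eq_true] at h0 h1 h2 h3
            simp [mp] at h0 h1 h2 h3 h4
            rcases h4 with h4 | h4 <;> rcases hF : F 4 pre with _ | c <;>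
              simp [bStep, bMatchers, List.zipIdx, List.find?, h0, h1, h2, h3, h4, hF,
                hFa 0, hFa 1, hFa 2, hFa 3, hFa 4, hp, mp]
          · simp only [Bool.not_eq_true] at h0 h1 h2 h3 h4
            simp [mp] at h0 h1 h2 h3 h4
            simp [bStep, bMatchers, List.zipIdx, List.find?, h0, h1, h2, h3, h4,
              hFa 0, hFa 1, hFa 2, hFa 3, hFa 4, mp]

theorem B_fold (cols pre : List String) :
    cols.foldl bStep [F 0 pre, F 1 pre, F 2 pre, F 3 pre, F 4 pre] =
    [F 0 (pre ++ cols), F 1 (pre ++ cols), F 2 (pre ++ cols), F 3 (pre ++ cols),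
     F 4 (pre ++ cols)] := by
  induction cols generalizing pre with
  | nil => simp
  | cons col rest ih =>
      rw [List.foldl_cons, bStep_eq, ih (pre ++ [col])]
      simp

-- ===== VERDICT (by name: the statement is the Claim_ definition above) =====
theorem default_compare_columns_py_spec : Claim_equal_default_compare_columns_py := by
  intro columns _
  unfold Spec_default_compare_columns_py default_compare_columns_py default_compare_columns_py_alt
  rw [A_ordered columns,
    show ([none, none, none, none, none] : List (Option String)) =
      [F 0 [], F 1 [], F 2 [], F 3 [], F 4 []] by simp [F]]
  have hB := B_fold columns []
  simp only [List.nil_append] at hB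
  rw [hB]
  by_cases hL : List.filterMap id [F 0 columns, F 1 columns, F 2 columns, F 3 columns,
      F 4 columns] = [] <;>
    simp [hL, take_min3]
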